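-- pv_equiv track=rewrite | github.com/joshbrooks/rakaia | src/rakaia/handler.py | _encode_sse_data
-- ===== SOURCE A (Python) =====
-- def _encode_sse_data(payload: str) -> str:
--     """Encode data for SSE format, handling multi-line payloads and preventing CRLF injection."""
--     # Replace carriage returns with a safe alternative or strip them
--     # Protocol Section 5.7: "Implementations MUST prevent CRLF injection in SSE events."
--     # We replace \r\n with \n, and then stray \r with \n so that they are formatted as separate lines.
--     # The tests explicitly check that `\r` becomes a newline `\n` which manifests as `data: `
--     # wait the test does "expect(controlContent.cr_injected).toBeUndefined()" so maybe replacing \r with nothing or space is better so it doesn't break JSON?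
--     # Actually the spec says "Any \r\n or \r characters in payload data MUST be normalized to \n before framing."
--     sanitized = payload.replace("\r\n", "\n").replace("\r", "\n")
--     lines = sanitized.split("\n")
--     result = ""
--     for line in lines:
--         result += f"data:{line}\n"
--     result += "\n"
--     return result
-- ===== SOURCE B (Python) =====
-- def _encode_sse_data(payload: str) -> str:
--     """Encode data for SSE format, handling multi-line payloads and preventing CRLF injection."""
--     sanitized = payload.replace("\r\n", "\n").replace("\r", "\n")
--     # Frame in one string transform: each newline delimiter becomes "\ndata:",
--     # one leading "data:" is prepended, and the blank-line terminator closes the event.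
--     return "data:" + sanitized.replace("\n", "\ndata:") + "\n\n"
-- ===== Notes on version B (the rewrite author's own statement) =====
-- stated objective: idiomatic
-- what changed: Replaces the split-into-lines loop with an explicit accumulator by a single str.replace that rewrites each newline into a newline followed by the data prefix, plus one prepended prefix and the blank-line terminator.
import Mathlib
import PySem

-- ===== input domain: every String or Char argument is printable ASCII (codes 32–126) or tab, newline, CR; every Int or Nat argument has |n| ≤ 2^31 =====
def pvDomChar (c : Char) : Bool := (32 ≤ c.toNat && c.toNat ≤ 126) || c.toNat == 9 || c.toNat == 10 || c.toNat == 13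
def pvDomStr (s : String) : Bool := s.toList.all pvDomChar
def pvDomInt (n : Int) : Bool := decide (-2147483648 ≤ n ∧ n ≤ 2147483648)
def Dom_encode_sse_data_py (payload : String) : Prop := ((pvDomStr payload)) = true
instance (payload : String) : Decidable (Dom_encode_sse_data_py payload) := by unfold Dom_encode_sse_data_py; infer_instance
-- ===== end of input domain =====

-- B frames the payload with a single str.replace ("\n" -> "\ndata:") plus a prepended
-- "data:" and the terminator, instead of A's split-into-lines loop (idiomatic one-pass transform).


-- ===== PORT A =====
-- literal port of A, on the List Char side (PySem.Chars = PySem.Str on toList)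
def encode_sse_data_py (payload : String) : String :=
  let sanitized := PySem.Chars.replace
    (PySem.Chars.replace payload.toList "\r\n".toList "\n".toList) "\r".toList "\n".toList
  let lines := (PySem.Chars.split? sanitized "\n".toList).getD []
  let result := lines.foldl (fun r line => r ++ ("data:".toList ++ (line ++ "\n".toList))) []
  String.ofList (result ++ "\n".toList)

-- ===== PORT B =====
def encode_sse_data_py_alt (payload : String) : String :=
  let sanitized := PySem.Chars.replace
    (PySem.Chars.replace payload.toList "\r\n".toList "\n".toList) "\r".toList "\n".toList
  String.ofList ("data:".toList ++ PySem.Chars.replace sanitized "\n".toList "\ndata:".toList ++ "\n\n".toList)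

-- ===== PRECONDITION & SPEC =====
def Spec_encode_sse_data_py (payload : String) (out : String) : Prop := out = encode_sse_data_py_alt payload
instance (payload : String) (out : String) : Decidable (Spec_encode_sse_data_py payload out) := by unfold Spec_encode_sse_data_py; infer_instance

-- ===== CLAIM (what is proved, stated in full; the proofs are below) =====
def Claim_equal_encode_sse_data_py : Prop := ∀ (payload : String), Dom_encode_sse_data_py payload → Spec_encode_sse_data_py payload (encode_sse_data_py payload)

-- ===== LEMMAS AND PROOFS =====

-- structural model of splitOn with a single-char separator: current piece is `pre`
def mySplit (c : Char) (pre : List Char) : List Char → List (List Char)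
  | [] => [pre]
  | a :: t => if a = c then pre :: mySplit c [] t else mySplit c (pre ++ [a]) t

-- structural model of replace with a single-char pattern
def myRepl (c : Char) (new : List Char) : List Char → List Char
  | [] => []
  | a :: t => if a = c then new ++ myRepl c new t else a :: myRepl c new t

theorem splitOn_go_spec (c : Char) : ∀ (fuel : Nat) (l cur : List Char) (acc : List (List Char)),
    l.length ≤ fuel →
    PySem.Chars.splitOn.go [c] fuel l cur acc
      = acc.reverse ++ mySplit c cur.reverse l := by
  intro fuel
  induction fuel with
  | zero =>
    intro l cur acc h
    have hl : l = [] := by cases l <;> simp_all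
    subst hl
    simp [PySem.Chars.splitOn.go, mySplit]
  | succ n ih =>
    intro l cur acc h
    cases l with
    | nil => simp [PySem.Chars.splitOn.go, mySplit]
    | cons a t =>
      by_cases hac : c = a
      · subst hac
        simp only [PySem.Chars.splitOn.go, List.isPrefixOf, BEq.rfl, Bool.true_and]
        rw [show List.drop [c].length (c :: t) = t from rfl]
        rw [ih t [] (cur.reverse :: acc) (by simpa using Nat.le_of_succ_le_succ h)]
        simp [mySplit]
      · have hpre : [c].isPrefixOf (a :: t) = false := by
          simp [List.isPrefixOf]; exact fun hc => (hac hc).elim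
        simp only [PySem.Chars.splitOn.go, hpre, Bool.false_eq_true, if_false]
        rw [ih t (a :: cur) acc (by simpa using Nat.le_of_succ_le_succ h)]
        have : a ≠ c := fun hh => hac hh.symm
        simp [mySplit, this]

theorem splitOn_single (c : Char) (l : List Char) :
    PySem.Chars.splitOn l [c] = mySplit c [] l := by
  have := splitOn_go_spec c (l.length + 1) l [] [] (Nat.le_succ _)
  simpa [PySem.Chars.splitOn] using this

theorem replace_go_spec (c : Char) (new : List Char) : ∀ (fuel : Nat) (l acc : List Char),
    l.length ≤ fuel →
    PySem.Chars.replace.go [c] new fuel l acc = acc.reverse ++ myRepl c new l := by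
  intro fuel
  induction fuel with
  | zero =>
    intro l acc h
    have hl : l = [] := by cases l <;> simp_all
    subst hl
    simp [PySem.Chars.replace.go, myRepl]
  | succ n ih =>
    intro l acc h
    cases l with
    | nil => simp [PySem.Chars.replace.go, myRepl]
    | cons a t =>
      by_cases hac : c = a
      · subst hac
        simp only [PySem.Chars.replace.go, List.isPrefixOf, BEq.rfl, Bool.true_and]
        rw [show List.drop [c].length (c :: t) = t from rfl]
        rw [ih t (new.reverse ++ acc) (by simpa using Nat.le_of_succ_le_succ h)]
        simp [myRepl]
      · have hpre : [c].isPrefixOf (a :: t) = false := by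
          simp [List.isPrefixOf]; exact fun hc => (hac hc).elim
        simp only [PySem.Chars.replace.go, hpre, Bool.false_eq_true, if_false]
        rw [ih t (a :: acc) (by simpa using Nat.le_of_succ_le_succ h)]
        have : a ≠ c := fun hh => hac hh.symm
        simp [myRepl, this]

theorem replace_single (c : Char) (new : List Char) (l : List Char) :
    PySem.Chars.replace l [c] new = myRepl c new l := by
  have := replace_go_spec c new l.length l [] (Nat.le_refl _)
  simpa [PySem.Chars.replace] using this

-- the framing identity: flattened "data:<line>\n" pieces = prefix + newline-rewrite + "\n"
theorem frame_eq (D : List Char) (c : Char) : ∀ (l pre : List Char),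
    (mySplit c pre l).flatMap (fun line => D ++ (line ++ [c]))
      = D ++ pre ++ myRepl c (c :: D) l ++ [c] := by
  intro l
  induction l with
  | nil => intro pre; simp [mySplit, myRepl]
  | cons a t ih =>
    intro pre
    by_cases hac : a = c
    · subst hac
      simp [mySplit, myRepl]
      rw [ih []]
      simp
    · simp only [mySplit, myRepl, if_neg hac, ih (pre ++ [a])]
      simp

-- ===== VERDICT (by name: the statement is the Claim_ definition above) =====
theorem encode_sse_data_py_spec : Claim_equal_encode_sse_data_py := by
  intro payload _
  unfold Spec_encode_sse_data_py encode_sse_data_py encode_sse_data_py_alt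
  simp only []
  set s := PySem.Chars.replace
      (PySem.Chars.replace payload.toList "\r\n".toList "\n".toList) "\r".toList "\n".toList with hs
  have hsplit : (PySem.Chars.split? s "\n".toList).getD [] = mySplit '\n' [] s := by
    simp [PySem.Chars.split?, splitOn_single]
  have hrepl : PySem.Chars.replace s "\n".toList "\ndata:".toList
      = myRepl '\n' ('\n' :: "data:".toList) s := by
    simpa using replace_single '\n' ('\n' :: "data:".toList) s
  rw [hsplit, hrepl,
    PySem.List.foldl_append_eq_flatMap (fun line => "data:".toList ++ (line ++ "\n".toList)),
    show ("\n".toList : List Char) = ['\n'] from rfl]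
  rw [frame_eq "data:".toList '\n' s []]
  simp
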